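-- pv_equiv track=rewrite | github.com/chengyitang/interview-algo-practices | amazon-intern-vo/2214_minimum_health_to_beat_game.py | minimumHealth
-- ===== SOURCE A (Python) =====
-- from typing import List
--
-- def minimumHealth(damage: List[int], armor: int) -> int:
--
--     # at each level, I'll need enough health (+ armor) to take the damage.
--     # health (+armor) - damage[i]> 0
--     # health > damage[i] (-armor)
--     # It's always optimal to use armor where you take the most amount of damage
--
--     max_damage = max(damage)
--     armor_used = False
--     health = 1
--     for i in range(len(damage) - 1, -1, -1):
--         if damage[i] == max_damage and not armor_used:
--             health += max(damage[i] - armor, 0)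
--             armor_used = True
--             continue
--         health += damage[i]
--     return health
-- ===== SOURCE B (Python) =====
-- from typing import List
--
-- def minimumHealth(damage: List[int], armor: int) -> int:
--     # max(damage) raises ValueError on an empty list, exactly as A does.
--     return sum(damage) + 1 - min(max(damage), armor)
-- ===== Notes on version B (the rewrite author's own statement) =====
-- stated objective: simpler
-- what changed: Replaces the backward index loop with an armor-used flag by a closed-form expression over sum(damage) and max(damage), using min(max(damage), armor) as the armor saving.
import Mathlib
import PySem

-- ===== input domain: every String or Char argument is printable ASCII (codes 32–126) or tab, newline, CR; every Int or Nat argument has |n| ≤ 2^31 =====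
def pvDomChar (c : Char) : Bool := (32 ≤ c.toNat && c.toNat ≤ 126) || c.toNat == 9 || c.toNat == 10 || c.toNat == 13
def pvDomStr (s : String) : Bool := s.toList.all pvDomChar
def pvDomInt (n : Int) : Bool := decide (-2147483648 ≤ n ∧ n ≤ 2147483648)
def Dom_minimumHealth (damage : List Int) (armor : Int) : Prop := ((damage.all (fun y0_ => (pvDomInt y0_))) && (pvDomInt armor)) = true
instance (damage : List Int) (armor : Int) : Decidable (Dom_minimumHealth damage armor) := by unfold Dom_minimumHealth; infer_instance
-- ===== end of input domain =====

-- B replaces A's backward loop with armor-used flag by the closed form sum + 1 - min(max, armor) (simpler).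

-- ===== PORT A =====
-- literal port: max(damage) (ValueError on [] — excluded by Pre_), then the backward
-- index loop carrying (health, armor_used)
def minimumHealth (damage : List Int) (armor : Int) : Int :=
  let max_damage := (PySem.List.max? damage (fun x => x)).getD 0
  let s := (PySem.List.pyRange ((damage.length : Int) - 1) (-1) (-1)).foldl
    (fun (s : Int × Bool) (i : Int) =>
      let d := PySem.List.pyGetD damage i 0
      if d = max_damage ∧ s.2 = false then (s.1 + max (d - armor) 0, true)
      else (s.1 + d, s.2)) (1, false)
  s.1

-- ===== PORT B =====
def minimumHealth_alt (damage : List Int) (armor : Int) : Int :=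
  damage.sum + 1 - min ((PySem.List.max? damage (fun x => x)).getD 0) armor

-- ===== PRECONDITION & SPEC =====
-- Pre_ excludes only the empty list, on which Python's max() raises ValueError in both A and B.
def Pre_minimumHealth (damage : List Int) (armor : Int) : Prop := damage ≠ []
instance (damage : List Int) (armor : Int) : Decidable (Pre_minimumHealth damage armor) := by unfold Pre_minimumHealth; infer_instance
def pvWitness_minimumHealth : List Int × Int := ([5, 2, 7], 3)

def Spec_minimumHealth (damage : List Int) (armor : Int) (out : Int) : Prop := out = minimumHealth_alt damage armor
instance (damage : List Int) (armor : Int) (out : Int) : Decidable (Spec_minimumHealth damage armor out) := by unfold Spec_minimumHealth; infer_instance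

-- ===== CLAIM (what is proved, stated in full; the proofs are below) =====
def Claim_equal_minimumHealth : Prop := ∀ (damage : List Int) (armor : Int), Dom_minimumHealth damage armor → Pre_minimumHealth damage armor → Spec_minimumHealth damage armor (minimumHealth damage armor)

-- ===== LEMMAS AND PROOFS =====

-- once the armor is used, the loop just sums the remaining damage
theorem pvFold_used (armor m : Int) (ys : List Int) (h : Int) :
    (ys.foldl (fun (s : Int × Bool) (d : Int) =>
      if d = m ∧ s.2 = false then (s.1 + max (d - armor) 0, true)
      else (s.1 + d, s.2)) (h, true)).1 = h + ys.sum := by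
  induction ys generalizing h with
  | nil => simp
  | cons x t ih => simp only [List.foldl_cons, List.sum_cons]; rw [if_neg (by simp), ih]; ring

-- before the armor is used: the first occurrence of the maximum m is clipped
theorem pvFold_unused (armor m : Int) (ys : List Int) (h : Int)
    (hm : m ∈ ys) (hle : ∀ y ∈ ys, y ≤ m) :
    (ys.foldl (fun (s : Int × Bool) (d : Int) =>
      if d = m ∧ s.2 = false then (s.1 + max (d - armor) 0, true)
      else (s.1 + d, s.2)) (h, false)).1 = h + ys.sum - min m armor := by
  induction ys generalizing h with
  | nil => simp at hm
  | cons x t ih =>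
    simp only [List.foldl_cons, List.sum_cons]
    by_cases hx : x = m
    · rw [if_pos (by simp [hx]), pvFold_used]
      subst hx; omega
    · rw [if_neg (by simp [hx])]
      have hm' : m ∈ t := by
        rcases List.mem_cons.mp hm with h1 | h1
        · exact absurd h1.symm hx
        · exact h1
      rw [ih (h + x) hm' (fun y hy => hle y (List.mem_cons_of_mem _ hy))]
      ring

-- ===== VERDICT (by name: the statement is the Claim_ definition above) =====
theorem minimumHealth_spec : Claim_equal_minimumHealth := by
  intro damage armor _ hne
  unfold Spec_minimumHealth minimumHealth minimumHealth_alt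
  obtain ⟨m, hm⟩ : ∃ m, PySem.List.max? damage (fun x => x) = some m := by
    cases hmax : PySem.List.max? damage (fun x => x) with
    | none => exact absurd ((PySem.List.max?_eq_none_iff _ _).1 hmax) hne
    | some m => exact ⟨m, rfl⟩
  have hmem := PySem.List.max?_mem hm
  have hle := PySem.List.max?_isMax (κ := Int) hm
  simp only [hm, Option.getD_some]
  have hrange : PySem.List.pyRange ((damage.length : Int) - 1) (-1) (-1)
      = (PySem.List.pyRange 0 (damage.length : Int)).reverse := by
    rw [PySem.List.pyRange_neg_one_eq_reverse]
    norm_num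
  have key :
      (List.foldl
        (fun (s : Int × Bool) (i : Int) =>
          if PySem.List.pyGetD damage i 0 = m ∧ s.2 = false then
            (s.1 + max (PySem.List.pyGetD damage i 0 - armor) 0, true)
          else (s.1 + PySem.List.pyGetD damage i 0, s.2))
        (1, false) ((PySem.List.pyRange 0 (damage.length : Int)).reverse)) =
      (List.foldl
        (fun (s : Int × Bool) (d : Int) =>
          if d = m ∧ s.2 = false then (s.1 + max (d - armor) 0, true)
          else (s.1 + d, s.2))
        (1, false)
        (((PySem.List.pyRange 0 (damage.length : Int)).reverse).map
          (fun j => PySem.List.pyGetD damage j 0))) :=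
    (List.foldl_map (f := fun j => PySem.List.pyGetD damage j 0)
      (g := fun (s : Int × Bool) (d : Int) =>
        if d = m ∧ s.2 = false then (s.1 + max (d - armor) 0, true)
        else (s.1 + d, s.2))
      (l := (PySem.List.pyRange 0 (damage.length : Int)).reverse)
      (init := ((1 : Int), false))).symm
  rw [hrange, key, List.map_reverse, PySem.List.map_pyGetD_pyRange_zero']
  rw [pvFold_unused armor m damage.reverse 1 (by simpa using hmem) (by simpa using hle)]
  simp
  ring
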